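-- pv_equiv track=rewrite | github.com/shubhamkriitr/respr | respr/eval/evaluation.py | creat_bins
-- ===== SOURCE A (Python) =====
-- def creat_bins(start, end, step):
--     s = start
--     n = start + step
--     bins = []
--     while n <= end:
--         bins.append([s, n])
--         s = n
--         n += step
--     return bins
-- ===== SOURCE B (Python) =====
-- def creat_bins(start, end, step):
--     if step <= 0:
--         return []
--     k = (end - start) // step
--     return [[start + i * step, start + (i + 1) * step] for i in range(k)]
-- ===== Notes on version B (the rewrite author's own statement) =====
-- stated objective: alternative
-- what changed: Replaces the sequential while-loop that appends pairs by repeated addition with a closed form: the number of bins is computed once as (end-start)//step and the bins are produced directly by indexed arithmetic over range(k).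
import Mathlib
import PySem

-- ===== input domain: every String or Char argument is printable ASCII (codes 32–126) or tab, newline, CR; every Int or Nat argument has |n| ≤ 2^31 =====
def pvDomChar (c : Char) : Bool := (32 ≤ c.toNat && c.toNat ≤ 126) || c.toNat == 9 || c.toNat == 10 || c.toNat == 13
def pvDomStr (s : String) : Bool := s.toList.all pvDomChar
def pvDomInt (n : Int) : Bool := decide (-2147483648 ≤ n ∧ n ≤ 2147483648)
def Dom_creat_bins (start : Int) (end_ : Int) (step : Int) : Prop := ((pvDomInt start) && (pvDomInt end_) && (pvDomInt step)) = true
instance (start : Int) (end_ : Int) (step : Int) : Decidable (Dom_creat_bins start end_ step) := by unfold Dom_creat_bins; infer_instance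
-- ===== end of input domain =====

-- B replaces A's sequential while-loop with a closed-form bin count and indexed construction (objective: alternative/simpler).

-- ===== PORT A =====
-- A's while loop, with enough fuel for every terminating run (step > 0, or loop body never entered).
def creatBinsLoopA (end_ step : Int) : Int → Int → Nat → List (List Int)
  | _, _, 0 => []
  | s, n, fuel + 1 =>
    if n ≤ end_ then [s, n] :: creatBinsLoopA end_ step n (n + step) fuel
    else []

def creat_bins (start : Int) (end_ : Int) (step : Int) : List (List Int) :=
  creatBinsLoopA end_ step start (start + step) ((end_ - start).toNat + 1)

-- ===== PORT B =====
def creat_bins_alt (start : Int) (end_ : Int) (step : Int) : List (List Int) :=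
  if step ≤ 0 then []
  else
    let k := PySem.Int.floordiv (end_ - start) step
    (List.range k.toNat).map (fun (i : Nat) => [start + (i : Int) * step, start + ((i : Int) + 1) * step])

-- ===== PRECONDITION & SPEC =====
-- Pre_ excludes exactly the inputs where A's while loop never terminates (step ≤ 0 with start + step ≤ end).
def Pre_creat_bins (start : Int) (end_ : Int) (step : Int) : Prop := 0 < step ∨ end_ < start + step
instance (start : Int) (end_ : Int) (step : Int) : Decidable (Pre_creat_bins start end_ step) := by unfold Pre_creat_bins; infer_instance
def pvWitness_creat_bins : Int × Int × Int := (0, 10, 3)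

def Spec_creat_bins (start : Int) (end_ : Int) (step : Int) (out : List (List Int)) : Prop := out = creat_bins_alt start end_ step
instance (start : Int) (end_ : Int) (step : Int) (out : List (List Int)) : Decidable (Spec_creat_bins start end_ step out) := by unfold Spec_creat_bins; infer_instance

-- ===== CLAIM (what is proved, stated in full; the proofs are below) =====
def Claim_equal_creat_bins : Prop := ∀ (start : Int) (end_ : Int) (step : Int), Dom_creat_bins start end_ step → Pre_creat_bins start end_ step → Spec_creat_bins start end_ step (creat_bins start end_ step)

-- ===== LEMMAS AND PROOFS =====

theorem pysem_floordiv_eq_fdiv (a b : Int) : PySem.Int.floordiv a b = Int.fdiv a b := by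
  rfl

theorem loopA_eq_map (end_ step : Int) (hs : 0 < step) :
    ∀ (fuel : Nat) (s : Int), end_ - s < fuel * step →
      creatBinsLoopA end_ step s (s + step) fuel =
        (List.range ((end_ - s).fdiv step).toNat).map
          (fun (i : Nat) => [s + (i : Int) * step, s + ((i : Int) + 1) * step]) := by
  intro fuel
  induction fuel with
  | zero =>
      intro s h
      simp only [Nat.cast_zero, zero_mul] at h
      have hneg : (end_ - s).fdiv step < 0 := Int.fdiv_neg_of_neg_of_pos (by omega) hs
      have : ((end_ - s).fdiv step).toNat = 0 := by omega
      simp [creatBinsLoopA, this]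
  | succ f ih =>
      intro s h
      by_cases hle : s + step ≤ end_
      · have hkey : (end_ - s).fdiv step = (end_ - (s + step)).fdiv step + 1 := by
          have : end_ - s = (end_ - (s + step)) + 1 * step := by ring
          rw [this, Int.add_mul_fdiv_right _ _ (by omega)]
        have hge : 0 ≤ (end_ - (s + step)).fdiv step := by
          apply Int.fdiv_nonneg <;> omega
        have hfuel : end_ - (s + step) < (f : Int) * step := by
          have hexp : ((f + 1 : Nat) : Int) * step = (f : Int) * step + step := by push_cast; ring
          omega
        have := ih (s + step) hfuel
        simp only [creatBinsLoopA, if_pos hle]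
        rw [this, hkey]
        have htn : ((end_ - (s + step)).fdiv step + 1).toNat = ((end_ - (s + step)).fdiv step).toNat + 1 := by omega
        rw [htn, List.range_succ_eq_map, List.map_cons, List.map_map]
        congr 1
        · simp
        · apply List.map_congr_left
          intro i _
          have h1 : s + step + (i : Int) * step = s + ((i : Int) + 1) * step := by ring
          have h2 : s + step + ((i : Int) + 1) * step = s + (((i : Int) + 1) + 1) * step := by ring
          simp [Function.comp, h1, h2]
      · have hlt : end_ - s < step := by omega
        have hnp : (end_ - s).fdiv step < 1 := by
          by_cases h0 : 0 ≤ end_ - s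
          · rw [Int.fdiv_eq_ediv_of_nonneg _ (by omega : (0:Int) ≤ step),
               Int.ediv_eq_zero_of_lt h0 (by omega)]
            omega
          · have := Int.fdiv_neg_of_neg_of_pos (by omega : end_ - s < 0) hs
            omega
        have : ((end_ - s).fdiv step).toNat = 0 := by omega
        simp [creatBinsLoopA, if_neg hle, this]

-- ===== VERDICT (by name: the statement is the Claim_ definition above) =====
theorem creat_bins_spec : Claim_equal_creat_bins := by
  intro start end_ step _ hpre
  unfold Spec_creat_bins creat_bins creat_bins_alt
  by_cases hs : 0 < step
  · rw [if_neg (by omega)]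
    have hfuel : end_ - start < (((end_ - start).toNat + 1 : Nat) : Int) * step := by
      have h1 : end_ - start < (((end_ - start).toNat + 1 : Nat) : Int) := by
        push_cast; omega
      calc end_ - start < (((end_ - start).toNat + 1 : Nat) : Int) := h1
        _ ≤ (((end_ - start).toNat + 1 : Nat) : Int) * step := le_mul_of_one_le_right (by positivity) (by omega)
    rw [loopA_eq_map end_ step hs _ start hfuel, pysem_floordiv_eq_fdiv]
  · have hend : end_ < start + step := by rcases hpre with h | h <;> omega
    rw [if_pos (by omega : step ≤ 0)]
    simp [creatBinsLoopA, show ¬ (start + step ≤ end_) from by omega]
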